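-- pv_equiv track=rewrite | github.com/voquang007-art/HVGL_QuanLyDieuHanh_clean | app/routers/leave_schedule.py | _calendar_role_label
-- ===== SOURCE A (Python) =====
-- def _calendar_role_label(role_codes: set[str]) -> str:
--     ordered = [
--         ("ROLE_TRUONG_KHOA", "Trưởng khoa"),
--         ("ROLE_PHO_TRUONG_KHOA", "Phó khoa"),
--         ("ROLE_DIEU_DUONG_TRUONG", "Điều dưỡng trưởng"),
--         ("ROLE_KY_THUAT_VIEN_TRUONG", "KTV trưởng"),
--         ("ROLE_TRUONG_DON_VI", "Trưởng đơn vị"),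
--         ("ROLE_PHO_DON_VI", "Phó đơn vị"),
--         ("ROLE_DIEU_DUONG_TRUONG_DON_VI", "ĐDT đơn vị"),
--         ("ROLE_KY_THUAT_VIEN_TRUONG_DON_VI", "KTVT đơn vị"),
--         ("ROLE_TRUONG_PHONG", "Trưởng phòng"),
--         ("ROLE_PHO_PHONG", "Phó phòng"),
--         ("ROLE_TO_TRUONG", "Tổ trưởng"),
--         ("ROLE_PHO_TO", "Tổ phó"),
--         ("ROLE_BAC_SI", "Bác sĩ"),
--         ("ROLE_DIEU_DUONG", "Điều dưỡng"),
--         ("ROLE_KY_THUAT_VIEN", "KTV"),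
--         ("ROLE_DUOC_SI", "Dược sĩ"),
--         ("ROLE_NHAN_VIEN", "Nhân viên"),
--     ]
--     for code, label in ordered:
--         if code in role_codes:
--             return label
--     return ""
-- ===== SOURCE B (Python) =====
-- _ORDER = {
--     "ROLE_TRUONG_KHOA": 0,
--     "ROLE_PHO_TRUONG_KHOA": 1,
--     "ROLE_DIEU_DUONG_TRUONG": 2,
--     "ROLE_KY_THUAT_VIEN_TRUONG": 3,
--     "ROLE_TRUONG_DON_VI": 4,
--     "ROLE_PHO_DON_VI": 5,
--     "ROLE_DIEU_DUONG_TRUONG_DON_VI": 6,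
--     "ROLE_KY_THUAT_VIEN_TRUONG_DON_VI": 7,
--     "ROLE_TRUONG_PHONG": 8,
--     "ROLE_PHO_PHONG": 9,
--     "ROLE_TO_TRUONG": 10,
--     "ROLE_PHO_TO": 11,
--     "ROLE_BAC_SI": 12,
--     "ROLE_DIEU_DUONG": 13,
--     "ROLE_KY_THUAT_VIEN": 14,
--     "ROLE_DUOC_SI": 15,
--     "ROLE_NHAN_VIEN": 16,
-- }
--
-- _LABELS = [
--     "Trưởng khoa",
--     "Phó khoa",
--     "Điều dưỡng trưởng",
--     "KTV trưởng",
--     "Trưởng đơn vị",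
--     "Phó đơn vị",
--     "ĐDT đơn vị",
--     "KTVT đơn vị",
--     "Trưởng phòng",
--     "Phó phòng",
--     "Tổ trưởng",
--     "Tổ phó",
--     "Bác sĩ",
--     "Điều dưỡng",
--     "KTV",
--     "Dược sĩ",
--     "Nhân viên",
-- ]
--
--
-- def _calendar_role_label(role_codes: set) -> str:
--     best = len(_LABELS)
--     for code in role_codes:
--         i = _ORDER.get(code)
--         if i is not None and i < best:
--             best = i
--     return _LABELS[best] if best < len(_LABELS) else ""
-- ===== Notes on version B (the rewrite author's own statement) =====
-- stated objective: alternative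
-- what changed: B keeps a code->priority-index dict and a parallel label list, scans the INPUT codes once keeping the running minimum priority index, and indexes the label list at the end, instead of A's scan of the fixed ordered pair list testing membership in the input at each step.
import Mathlib
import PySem

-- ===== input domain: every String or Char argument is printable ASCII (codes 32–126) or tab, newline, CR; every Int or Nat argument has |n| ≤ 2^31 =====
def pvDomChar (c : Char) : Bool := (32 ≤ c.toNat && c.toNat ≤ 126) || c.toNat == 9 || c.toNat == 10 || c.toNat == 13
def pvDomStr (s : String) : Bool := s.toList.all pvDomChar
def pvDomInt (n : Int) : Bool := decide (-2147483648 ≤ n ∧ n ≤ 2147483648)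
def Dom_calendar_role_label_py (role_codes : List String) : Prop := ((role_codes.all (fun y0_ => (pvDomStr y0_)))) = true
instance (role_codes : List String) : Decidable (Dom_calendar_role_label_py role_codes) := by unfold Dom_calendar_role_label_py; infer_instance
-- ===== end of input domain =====

-- B replaces A's ordered-list scan with membership tests by a single pass over the input codes
-- keeping the running minimum priority index from a code→index dict, then one label-list index
-- at the end (objective: alternative decomposition; not claimed faster).

-- ===== PORT A =====
-- A's for-loop with early return over its local ordered pair list
def aScan : List (String × String) → List String → String
  | [], _ => ""
  | (c, l) :: t, rs => if rs.contains c then l else aScan t rs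

def calendar_role_label_py (role_codes : List String) : String :=
  aScan
    [("ROLE_TRUONG_KHOA", "Trưởng khoa"),
     ("ROLE_PHO_TRUONG_KHOA", "Phó khoa"),
     ("ROLE_DIEU_DUONG_TRUONG", "Điều dưỡng trưởng"),
     ("ROLE_KY_THUAT_VIEN_TRUONG", "KTV trưởng"),
     ("ROLE_TRUONG_DON_VI", "Trưởng đơn vị"),
     ("ROLE_PHO_DON_VI", "Phó đơn vị"),
     ("ROLE_DIEU_DUONG_TRUONG_DON_VI", "ĐDT đơn vị"),
     ("ROLE_KY_THUAT_VIEN_TRUONG_DON_VI", "KTVT đơn vị"),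
     ("ROLE_TRUONG_PHONG", "Trưởng phòng"),
     ("ROLE_PHO_PHONG", "Phó phòng"),
     ("ROLE_TO_TRUONG", "Tổ trưởng"),
     ("ROLE_PHO_TO", "Tổ phó"),
     ("ROLE_BAC_SI", "Bác sĩ"),
     ("ROLE_DIEU_DUONG", "Điều dưỡng"),
     ("ROLE_KY_THUAT_VIEN", "KTV"),
     ("ROLE_DUOC_SI", "Dược sĩ"),
     ("ROLE_NHAN_VIEN", "Nhân viên")]
    role_codes

-- ===== PORT B =====
-- Source B's module-level _ORDER dict (distinct keys, insertion order) and _LABELS list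
def orderIdxB : PySem.Dict String Int :=
  PySem.Dict.mk
    [("ROLE_TRUONG_KHOA", 0),
     ("ROLE_PHO_TRUONG_KHOA", 1),
     ("ROLE_DIEU_DUONG_TRUONG", 2),
     ("ROLE_KY_THUAT_VIEN_TRUONG", 3),
     ("ROLE_TRUONG_DON_VI", 4),
     ("ROLE_PHO_DON_VI", 5),
     ("ROLE_DIEU_DUONG_TRUONG_DON_VI", 6),
     ("ROLE_KY_THUAT_VIEN_TRUONG_DON_VI", 7),
     ("ROLE_TRUONG_PHONG", 8),
     ("ROLE_PHO_PHONG", 9),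
     ("ROLE_TO_TRUONG", 10),
     ("ROLE_PHO_TO", 11),
     ("ROLE_BAC_SI", 12),
     ("ROLE_DIEU_DUONG", 13),
     ("ROLE_KY_THUAT_VIEN", 14),
     ("ROLE_DUOC_SI", 15),
     ("ROLE_NHAN_VIEN", 16)]

def labelsB : List String :=
  ["Trưởng khoa", "Phó khoa", "Điều dưỡng trưởng", "KTV trưởng",
   "Trưởng đơn vị", "Phó đơn vị", "ĐDT đơn vị", "KTVT đơn vị",
   "Trưởng phòng", "Phó phòng", "Tổ trưởng", "Tổ phó",
   "Bác sĩ", "Điều dưỡng", "KTV", "Dược sĩ", "Nhân viên"]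

-- the for-loop keeps the minimum matched priority index; the final '_LABELS[best] if best < len(_LABELS) else ""'
-- is the guarded list index (the guard makes pyGet? return some, so getD "" is exact)
def calendar_role_label_py_alt (role_codes : List String) : String :=
  let best : Int :=
    role_codes.foldl
      (fun b code =>
        match orderIdxB.get? code with
        | some i => if i < b then i else b
        | none => b)
      ((labelsB.length : Int))
  if best < (labelsB.length : Int) then (PySem.List.pyGet? labelsB best).getD "" else ""

-- ===== PRECONDITION & SPEC =====
def Spec_calendar_role_label_py (role_codes : List String) (out : String) : Prop := out = calendar_role_label_py_alt role_codes
instance (role_codes : List String) (out : String) : Decidable (Spec_calendar_role_label_py role_codes out) := by unfold Spec_calendar_role_label_py; infer_instance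

-- ===== CLAIM (what is proved, stated in full; the proofs are below) =====
def Claim_equal_calendar_role_label_py : Prop := ∀ (role_codes : List String), Dom_calendar_role_label_py role_codes → Spec_calendar_role_label_py role_codes (calendar_role_label_py role_codes)

-- ===== LEMMAS AND PROOFS =====

-- A's table as a named list (definitionally the literal inlined in port A)
def orderedA : List (String × String) :=
  [("ROLE_TRUONG_KHOA", "Trưởng khoa"),
   ("ROLE_PHO_TRUONG_KHOA", "Phó khoa"),
   ("ROLE_DIEU_DUONG_TRUONG", "Điều dưỡng trưởng"),
   ("ROLE_KY_THUAT_VIEN_TRUONG", "KTV trưởng"),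
   ("ROLE_TRUONG_DON_VI", "Trưởng đơn vị"),
   ("ROLE_PHO_DON_VI", "Phó đơn vị"),
   ("ROLE_DIEU_DUONG_TRUONG_DON_VI", "ĐDT đơn vị"),
   ("ROLE_KY_THUAT_VIEN_TRUONG_DON_VI", "KTVT đơn vị"),
   ("ROLE_TRUONG_PHONG", "Trưởng phòng"),
   ("ROLE_PHO_PHONG", "Phó phòng"),
   ("ROLE_TO_TRUONG", "Tổ trưởng"),
   ("ROLE_PHO_TO", "Tổ phó"),
   ("ROLE_BAC_SI", "Bác sĩ"),
   ("ROLE_DIEU_DUONG", "Điều dưỡng"),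
   ("ROLE_KY_THUAT_VIEN", "KTV"),
   ("ROLE_DUOC_SI", "Dược sĩ"),
   ("ROLE_NHAN_VIEN", "Nhân viên")]

-- the indices that _ORDER pairs with the codes of the ordered list, starting at n
def mkIdx : List (String × String) → Int → List (String × Int)
  | [], _ => []
  | (c, _) :: t, n => (c, n) :: mkIdx t (n + 1)

def lookupI (tbl : List (String × Int)) (code : String) : Option Int :=
  (tbl.find? (fun p => p.1 == code)).map (·.2)

def iStep (b i : Int) : Int := if i < b then i else b

-- first entry of os whose code is in rs, with its absolute index (offset n)
def firstHit : List (String × String) → List String → Int → Option (Int × String)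
  | [], _, _ => none
  | (c, l) :: t, rs, n => if rs.contains c then some (n, l) else firstHit t rs (n + 1)

theorem get?_mk_eq_find (L : List (String × Int)) (x : String) :
    (PySem.Dict.mk L).get? x = (L.find? (fun p => p.1 == x)).map (·.2) := by
  induction L with
  | nil => rfl
  | cons p t ih =>
    rcases p with ⟨k, v⟩
    rw [PySem.Dict.get?_mk_cons, List.find?_cons]
    by_cases h : k = x
    · simp [h]
    · simp only [show (k == x) = false by simp [h]]
      exact ih

theorem foldl_step_eq (T : List (String × Int)) (rs : List String) (b : Int) :
    rs.foldl (fun b code =>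
        match lookupI T code with
        | some i => if i < b then i else b
        | none => b) b
      = (rs.filterMap (lookupI T)).foldl iStep b := by
  induction rs generalizing b with
  | nil => rfl
  | cons x t ih =>
    simp only [List.foldl_cons, List.filterMap_cons]
    cases h : lookupI T x with
    | none => exact ih b
    | some i => rw [ih]; rfl

theorem foldl_iStep_no_improve (ps : List Int) (b : Int)
    (h : ∀ p ∈ ps, ¬ p < b) : ps.foldl iStep b = b := by
  induction ps with
  | nil => rfl
  | cons p t ih =>
    have hp : ¬ p < b := h p (by simp)
    simp only [List.foldl_cons, iStep, if_neg hp]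
    exact ih (fun q hq => h q (by simp [hq]))

theorem foldl_iStep_min (ps : List Int) (b q : Int)
    (hmem : q ∈ ps) (hb : q < b) (hmin : ∀ p ∈ ps, q ≤ p) :
    ps.foldl iStep b = q := by
  induction ps generalizing b with
  | nil => cases hmem
  | cons p t ih =>
    simp only [List.foldl_cons]
    by_cases hpq : p = q
    · subst hpq
      rw [iStep, if_pos hb]
      exact foldl_iStep_no_improve t p (by
        intro r hr
        have := hmin r (by simp [hr]); omega)
    · have hlt : q < p := by
        have := hmin p (by simp); omega
      have hq : q ∈ t := by
        rcases List.mem_cons.mp hmem with h1 | h1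
        · exact absurd h1.symm hpq
        · exact h1
      have : q < iStep b p := by
        rw [iStep]; split_ifs with h1 <;> omega
      exact ih _ hq this (fun r hr => hmin r (List.mem_cons_of_mem _ hr))

theorem mkIdx_index_le (os : List (String × String)) (n : Int) :
    ∀ p ∈ mkIdx os n, n ≤ p.2 := by
  induction os generalizing n with
  | nil => intro p hp; cases hp
  | cons e t ih =>
    intro p hp
    rcases e with ⟨c, l⟩
    rcases List.mem_cons.mp hp with h | h
    · subst h; simp
    · have := ih (n + 1) p h; omega

theorem lookupI_index_le (os : List (String × String)) (n : Int) (code : String)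
    (i : Int) (h : lookupI (mkIdx os n) code = some i) : n ≤ i := by
  unfold lookupI at h
  rcases Option.map_eq_some_iff.mp h with ⟨p, hp, hpe⟩
  have hmem := List.mem_of_find?_eq_some hp
  have := mkIdx_index_le os n p hmem
  rw [hpe] at this; exact this

theorem lookupI_cons_of_ne (c : String) (v : Int)
    (T : List (String × Int)) (code : String) (h : code ≠ c) :
    lookupI ((c, v) :: T) code = lookupI T code := by
  unfold lookupI
  rw [List.find?_cons_of_neg]
  simp [Ne.symm h]

theorem key_lemma (os : List (String × String)) (rs : List String) :
    ∀ (n : Int) (b : Int), n + (os.length : Int) ≤ b →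
    (rs.filterMap (lookupI (mkIdx os n))).foldl iStep b
      = match firstHit os rs n with
        | none => b
        | some il => il.1 := by
  induction os with
  | nil =>
    intro n b _
    simp [mkIdx, firstHit, lookupI]
  | cons e t ih =>
    intro n b hb
    rcases e with ⟨c, l⟩
    simp only [mkIdx, firstHit]
    by_cases hc : rs.contains c
    · rw [if_pos hc]
      show _ = n
      apply foldl_iStep_min
      · exact List.mem_filterMap.mpr ⟨c, by
          refine ⟨List.contains_iff_mem.mp hc, ?_⟩
          unfold lookupI
          rw [List.find?_cons_of_pos (by simp)]
          rfl⟩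
      · simp only [List.length_cons] at hb
        push_cast at hb ⊢
        omega
      · intro p hp
        rcases List.mem_filterMap.mp hp with ⟨code, _, hcode⟩
        by_cases hec : code = c
        · subst hec
          unfold lookupI at hcode
          rw [List.find?_cons_of_pos (by simp)] at hcode
          simp at hcode
          omega
        · rw [lookupI_cons_of_ne c n _ code hec] at hcode
          have := lookupI_index_le t (n + 1) code p hcode
          omega
    · rw [if_neg hc]
      have hfm : rs.filterMap (lookupI ((c, n) :: mkIdx t (n + 1)))
          = rs.filterMap (lookupI (mkIdx t (n + 1))) := by
        apply List.filterMap_congr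
        intro code hcode
        have hne : code ≠ c := by
          intro h; subst h
          exact hc (List.contains_iff_mem.mpr hcode)
        exact lookupI_cons_of_ne c n _ code hne
      rw [hfm]
      apply ih
      simp only [List.length_cons] at hb
      push_cast at hb ⊢
      omega

theorem aScan_eq_firstHit (os : List (String × String)) (rs : List String) :
    ∀ n : Int, aScan os rs
      = (match firstHit os rs n with
         | none => ((0 : Int), "")
         | some il => il).2 := by
  induction os with
  | nil => intro n; rfl
  | cons e t ih =>
    intro n
    rcases e with ⟨c, l⟩
    simp only [aScan, firstHit]
    by_cases hc : rs.contains c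
    · have hm : c ∈ rs := by simpa using hc
      simp [hm]
    · simp only [hc, Bool.false_eq_true, if_false]
      exact ih (n + 1)

theorem pyGet?_cons_pos (x : String) (xs : List String) (k : Int) (hk : 1 ≤ k) :
    PySem.List.pyGet? (x :: xs) k = PySem.List.pyGet? xs (k - 1) := by
  obtain ⟨m, hm⟩ : ∃ m : Nat, k = ((m + 1 : Nat) : Int) := ⟨(k - 1).toNat, by omega⟩
  subst hm
  have h2 : ((m + 1 : Nat) : Int) - 1 = ((m : Nat) : Int) := by push_cast; ring
  rw [h2, PySem.List.pyGet?_natCast, PySem.List.pyGet?_natCast]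
  simp

theorem firstHit_label (os : List (String × String)) (rs : List String) :
    ∀ (n i : Int) (l : String), firstHit os rs n = some (i, l) →
      n ≤ i ∧ i < n + (os.length : Int) ∧
      PySem.List.pyGet? (os.map (·.2)) (i - n) = some l := by
  induction os with
  | nil => intro n i l h; cases h
  | cons e t ih =>
    intro n i l h
    rcases e with ⟨c, l'⟩
    simp only [firstHit] at h
    by_cases hc : rs.contains c
    · rw [if_pos hc] at h
      obtain ⟨h1, h2⟩ : n = i ∧ l' = l := by
        have := Option.some.inj h
        exact ⟨congrArg Prod.fst this, congrArg Prod.snd this⟩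
      subst h1; subst h2
      refine ⟨le_refl _, by simp only [List.length_cons]; push_cast; omega, ?_⟩
      have : n - n = ((0 : Nat) : Int) := by omega
      rw [this, PySem.List.pyGet?_natCast]
      simp
    · rw [if_neg hc] at h
      obtain ⟨ha, hb, hg⟩ := ih (n + 1) i l h
      refine ⟨by omega, by simp only [List.length_cons]; push_cast at hb ⊢; omega, ?_⟩
      rw [List.map_cons, pyGet?_cons_pos _ _ _ (by omega)]
      have : i - n - 1 = i - (n + 1) := by omega
      rw [this]; exact hg

-- ===== VERDICT (by name: the statement is the Claim_ definition above) =====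
theorem calendar_role_label_py_spec : Claim_equal_calendar_role_label_py := by
  intro rs _
  show aScan orderedA rs = calendar_role_label_py_alt rs
  have hget : ∀ c, orderIdxB.get? c = lookupI (mkIdx orderedA 0) c :=
    fun c => get?_mk_eq_find (mkIdx orderedA 0) c
  show aScan orderedA rs =
    (if (rs.foldl (fun b code =>
          match orderIdxB.get? code with
          | some i => if i < b then i else b
          | none => b) ((labelsB.length : Int))) < (labelsB.length : Int)
     then (PySem.List.pyGet? labelsB
        (rs.foldl (fun b code =>
          match orderIdxB.get? code with
          | some i => if i < b then i else b
          | none => b) ((labelsB.length : Int)))).getD ""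
     else "")
  simp only [hget, foldl_step_eq]
  rw [key_lemma orderedA rs 0 ((labelsB.length : Int)) (by decide)]
  rw [aScan_eq_firstHit orderedA rs 0]
  cases hfh : firstHit orderedA rs 0 with
  | none => simp
  | some il =>
    obtain ⟨i, l⟩ := il
    obtain ⟨h0, hlt, hg⟩ := firstHit_label orderedA rs 0 i l hfh
    have hlen : (labelsB.length : Int) = 17 := by decide
    have hlen2 : (orderedA.length : Int) = 17 := by decide
    rw [hlen2] at hlt
    simp only [hlen]
    rw [if_pos (by omega)]
    have hmap : orderedA.map (·.2) = labelsB := by decide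
    rw [hmap] at hg
    have : i - 0 = i := by omega
    rw [this] at hg
    rw [hg]
    rfl
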